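-- pv_equiv track=rewrite | github.com/shadowmydx/ATOP | generator/network.py | _virtual_idx_to_coords
-- ===== SOURCE A (Python) =====
-- def _virtual_idx_to_coords(virtual_idx, Sik):
--     """将节点的1D虚拟索引转换为多维坐标。"""
--     coords = []
--     temp_idx = virtual_idx
--     # 从最后一个维度开始计算，维度尺寸列表也应该相应反转
--     # 例如 32 = 8x4, 索引20 -> 20 // 4 = 5 (dim0), 20 % 4 = 0 (dim1) -> (5,0)
--     # 这要求我们知道每个维度的乘数，或者反向计算
--     # temp_idx = 20, Sik = [8, 4]
--     # reversed(Sik) = [4, 8]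
--     # temp_idx % 4 = 0 (coord for dim1), temp_idx //= 4 -> 5
--     # temp_idx % 8 = 5 (coord for dim0), temp_idx //= 8 -> 0
--     # coords = [0], then [5, 0]
--
--     # 修正坐标计算逻辑，使其更直观
--     # idx = x1 * S2*S3... + x2 * S3*S4... + ...
--     # 因此 x1 = idx // (S2*S3...), rem = idx % (S2*S3...)
--     # x2 = rem // (S3*S4...), ...
--     product = 1
--     for s in Sik[1:]:
--         product *= s
--
--     rem = virtual_idx
--     for i in range(len(Sik)):
--         coord = rem // product
--         coords.append(coord)
--         rem %= product
--         if i < len(Sik) - 1: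
--             product //= Sik[i+1] if Sik[i+1] > 0 else 1
--             if product == 0: product = 1
--
--     return coords
-- ===== SOURCE B (Python) =====
-- def _virtual_idx_to_coords(virtual_idx, Sik):
--     """将节点的1D虚拟索引转换为多维坐标。"""
--     if not Sik:
--         return []
--     rev = []
--     temp = virtual_idx
--     for s in reversed(Sik[1:]):
--         rev.append(temp % s)
--         temp //= s
--     rev.append(temp)
--     return list(reversed(rev))
-- ===== Notes on version B (the rewrite author's own statement) =====
-- stated objective: simpler
-- what changed: B extracts the mixed-radix digits least-significant-first with a single divmod register over reversed(Sik[1:]) and reverses at the end, eliminating A's precomputed suffix product and its guarded product-update bookkeeping.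
-- outside the precondition, e.g. on _virtual_idx_to_coords(5, [2, 0]): A raises ZeroDivisionError, B raises ZeroDivisionError; on _virtual_idx_to_coords(5, [2, -3]): A returns [-2, 0], B returns [-2, -1]
import Mathlib
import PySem

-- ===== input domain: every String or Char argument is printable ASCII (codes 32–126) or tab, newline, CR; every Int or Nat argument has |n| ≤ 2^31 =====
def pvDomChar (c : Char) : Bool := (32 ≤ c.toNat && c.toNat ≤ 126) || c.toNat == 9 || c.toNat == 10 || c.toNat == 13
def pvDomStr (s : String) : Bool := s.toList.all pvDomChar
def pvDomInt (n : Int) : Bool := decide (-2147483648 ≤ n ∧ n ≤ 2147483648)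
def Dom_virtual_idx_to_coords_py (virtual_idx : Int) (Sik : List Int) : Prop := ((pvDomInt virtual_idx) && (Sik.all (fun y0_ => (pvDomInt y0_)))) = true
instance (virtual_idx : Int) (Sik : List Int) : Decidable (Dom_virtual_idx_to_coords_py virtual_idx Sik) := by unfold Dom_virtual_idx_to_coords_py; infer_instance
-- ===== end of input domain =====

-- B replaces A's precomputed suffix product and guarded product updates by a single
-- least-significant-first divmod register over reversed(Sik[1:]) (objective: simpler).


-- ===== PORT A =====
-- 'for i in range(len(Sik))' as a counting recursion over the same state (coords, rem, product).
-- Sik[i+1] (always in range when read, since i < len(Sik) - 1) is ported with pyGetD.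
def pvLoopA (Sik : List Int) (n i : Nat) (coords : List Int) (rem product : Int) : List Int :=
  if h : i < n then
    let coord := PySem.Int.floordiv rem product
    let coords := coords ++ [coord]
    let rem := PySem.Int.mod rem product
    if (i : Int) < (n : Int) - 1 then
      let nxt := PySem.List.pyGetD Sik ((i : Int) + 1) 0
      let product := PySem.Int.floordiv product (if nxt > 0 then nxt else 1)
      let product := if product = 0 then 1 else product
      pvLoopA Sik n (i + 1) coords rem product
    else
      pvLoopA Sik n (i + 1) coords rem product
  else coords
termination_by n - i

def virtual_idx_to_coords_py (virtual_idx : Int) (Sik : List Int) : List Int :=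
  let product := (PySem.List.slice Sik (some 1) none).foldl (fun p s => p * s) 1
  pvLoopA Sik Sik.length 0 [] virtual_idx product

-- ===== PORT B =====
def virtual_idx_to_coords_py_alt (virtual_idx : Int) (Sik : List Int) : List Int :=
  if Sik = [] then []
  else
    let st := (PySem.List.slice Sik (some 1) none).reverse.foldl
      (fun (st : List Int × Int) s =>
        (st.1 ++ [PySem.Int.mod st.2 s], PySem.Int.floordiv st.2 s))
      ([], virtual_idx)
    (st.1 ++ [st.2]).reverse

-- ===== PRECONDITION & SPEC =====
-- Pre_ excludes inputs whose tail Sik[1:] contains a non-positive dimension size: a zero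
-- makes A raise ZeroDivisionError, and negative sizes are outside the natural domain of
-- dimension-size lists (A's value there is shaped by its 'product = 1' fallback guards).
def Pre_virtual_idx_to_coords_py (virtual_idx : Int) (Sik : List Int) : Prop :=
  ∀ s ∈ Sik.tail, 0 < s
instance (virtual_idx : Int) (Sik : List Int) : Decidable (Pre_virtual_idx_to_coords_py virtual_idx Sik) := by unfold Pre_virtual_idx_to_coords_py; infer_instance
def pvWitness_virtual_idx_to_coords_py : Int × List Int := (20, [8, 4])
def Spec_virtual_idx_to_coords_py (virtual_idx : Int) (Sik : List Int) (out : List Int) : Prop := out = virtual_idx_to_coords_py_alt virtual_idx Sik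
instance (virtual_idx : Int) (Sik : List Int) (out : List Int) : Decidable (Spec_virtual_idx_to_coords_py virtual_idx Sik out) := by unfold Spec_virtual_idx_to_coords_py; infer_instance

-- ===== CLAIM (what is proved, stated in full; the proofs are below) =====
def Claim_equal_virtual_idx_to_coords_py : Prop := ∀ (virtual_idx : Int) (Sik : List Int), Dom_virtual_idx_to_coords_py virtual_idx Sik → Pre_virtual_idx_to_coords_py virtual_idx Sik → Spec_virtual_idx_to_coords_py virtual_idx Sik (virtual_idx_to_coords_py virtual_idx Sik)

-- ===== LEMMAS AND PROOFS =====

-- the common mixed-radix reference: pvF temp t = [temp // P t, ...] with suffix products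
def pvP (t : List Int) : Int := t.foldl (fun p s => p * s) 1

def pvF (temp : Int) : List Int → List Int
  | [] => [temp]
  | s :: t => temp / (s * pvP t) :: pvF (temp % (s * pvP t)) t

theorem pvP_eq_prod (t : List Int) : pvP t = t.prod := by
  simp [pvP, List.prod_eq_foldl]

theorem pvP_pos (t : List Int) (ht : ∀ s ∈ t, 0 < s) : 0 < pvP t := by
  rw [pvP_eq_prod]
  exact List.prod_pos ht

theorem pvF_cons (temp : Int) (t : List Int) : ∃ c cs, pvF temp t = c :: cs := by
  cases t <;> exact ⟨_, _, rfl⟩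

theorem pv_div_of_mod (a s m : Int) (hs : 0 < s) : (a % (m*s)) / s = (a/s) % m := by
  have h2 : a % (m*s) = ((a/s)%m)*s + a%s := by
    have e1 := Int.emod_add_mul_ediv a s
    have e2 := Int.emod_add_mul_ediv (a/s) m
    have e3 : a/s/m = a/(s*m) := Int.ediv_ediv_of_nonneg (le_of_lt hs)
    have e4 := Int.emod_add_mul_ediv a (m*s)
    have key : a = a%s + ((a/s)%m)*s + (s*m)*(a/(s*m)) := by
      calc a = a%s + s*(a/s) := by linarith [e1]
        _ = a%s + s*((a/s)%m + m*(a/s/m)) := by rw [e2]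
        _ = a%s + ((a/s)%m)*s + (s*m)*(a/s/m) := by ring
        _ = a%s + ((a/s)%m)*s + (s*m)*(a/(s*m)) := by rw [e3]
    have e5 : (m*s)*(a/(m*s)) = (s*m)*(a/(s*m)) := by rw [mul_comm m s]
    linarith [e4, key, e5]
  rw [h2]
  have hms : 0 ≤ a % s := Int.emod_nonneg a (by omega)
  have hlt : a % s < s := Int.emod_lt_of_pos a hs
  rw [add_comm, Int.add_mul_ediv_right _ _ (by omega : s ≠ 0), Int.ediv_eq_zero_of_lt hms hlt]
  ring

theorem pvP_append_singleton (t : List Int) (s : Int) : pvP (t ++ [s]) = pvP t * s := by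
  simp [pvP_eq_prod]

theorem pvF_snoc (a s : Int) (t : List Int) (hs : 0 < s) (ht : ∀ x ∈ t, 0 < x) :
    pvF a (t ++ [s]) = pvF (a / s) t ++ [a % s] := by
  induction t generalizing a with
  | nil => simp [pvF, pvP]
  | cons u r ih =>
    have hr : ∀ x ∈ r, 0 < x := fun x hx => ht x (by simp [hx])
    simp only [List.cons_append, pvF, pvP_append_singleton, ← mul_assoc]
    have hdd : a / (u * pvP r * s) = a / s / (u * pvP r) := by
      rw [mul_comm (u * pvP r) s]
      exact (Int.ediv_ediv_of_nonneg (le_of_lt hs)).symm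
    have hmm : a % (u * pvP r * s) % s = a % s :=
      Int.emod_emod_of_dvd a ⟨u * pvP r, by ring⟩
    have hdm : a % (u * pvP r * s) / s = (a / s) % (u * pvP r) := pv_div_of_mod a s _ hs
    rw [hdd, ih _ hr, hmm, hdm]

-- A's loop computes pvF on the remaining suffix
theorem pvLoopA_eq (Sik : List Int) (ht : ∀ s ∈ Sik.tail, 0 < s) :
    ∀ (k i : Nat) (coords : List Int) (rem : Int),
      i + k = Sik.length → i < Sik.length →
      pvLoopA Sik Sik.length i coords rem (pvP (Sik.drop (i + 1))) =
        coords ++ pvF rem (Sik.drop (i + 1)) := by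
  intro k
  induction k with
  | zero => intro i coords rem hik hi; omega
  | succ k ih =>
    intro i coords rem hik hi
    have hdropPos : ∀ x ∈ Sik.drop (i + 1), 0 < x := by
      intro x hx
      apply ht
      rw [← List.drop_one]
      have e : Sik.drop (i + 1) = (Sik.drop 1).drop i := by
        rw [List.drop_drop, Nat.add_comm]
      exact List.drop_subset i (Sik.drop 1) (by rwa [e] at hx)
    have hP : 0 < pvP (Sik.drop (i + 1)) := pvP_pos _ hdropPos
    rw [pvLoopA]
    simp only [hi, dif_pos]
    by_cases hlast : (i : Int) < (Sik.length : Int) - 1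
    · have hi1 : i + 1 < Sik.length := by omega
      have hget : PySem.List.pyGetD Sik ((i : Int) + 1) 0 = Sik[i + 1] := by
        have := PySem.List.pyGetD_natCast Sik (i + 1) 0
        rw [show ((i : Int) + 1) = ((i + 1 : Nat) : Int) by push_cast; ring, this,
          List.getD_eq_getElem Sik 0 hi1]
      have hdrop : Sik.drop (i + 1) = Sik[i + 1] :: Sik.drop (i + 2) :=
        List.drop_eq_getElem_cons hi1
      have hnxtPos : 0 < Sik[i + 1] := hdropPos _ (hdrop ▸ List.mem_cons_self)
      have hP2 : 0 < pvP (Sik.drop (i + 2)) := by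
        apply pvP_pos
        intro x hx
        exact hdropPos x (by rw [hdrop]; exact List.mem_cons_of_mem _ hx)
      have hPfact : pvP (Sik.drop (i + 1)) = Sik[i + 1] * pvP (Sik.drop (i + 2)) := by
        rw [hdrop, pvP_eq_prod, pvP_eq_prod, List.prod_cons]
      simp only [hlast, if_pos, hget, hnxtPos, if_pos]
      have hupd : PySem.Int.floordiv (pvP (Sik.drop (i + 1))) Sik[i + 1] = pvP (Sik.drop (i + 2)) := by
        rw [PySem.Int.floordiv_eq_ediv_of_pos hnxtPos, hPfact, mul_comm,
          Int.mul_ediv_cancel _ (by omega)]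
      rw [hupd]
      simp only [hP2.ne', if_neg, not_false_eq_true]
      have hrec := ih (i + 1) (coords ++ [PySem.Int.floordiv rem (pvP (Sik.drop (i + 1)))])
        (PySem.Int.mod rem (pvP (Sik.drop (i + 1)))) (by omega) hi1
      rw [show i + 1 + 1 = i + 2 from rfl] at hrec
      rw [hrec, hdrop]
      have hPc : pvP (Sik[i + 1] :: Sik.drop (i + 2)) = Sik[i + 1] * pvP (Sik.drop (i + 2)) := by
        rw [pvP_eq_prod, pvP_eq_prod, List.prod_cons]
      have hQ : 0 < Sik[i + 1] * pvP (Sik.drop (i + 2)) := mul_pos hnxtPos hP2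
      simp only [pvF, hPc]
      rw [PySem.Int.floordiv_eq_ediv_of_pos hQ, PySem.Int.mod_eq_emod_of_pos hQ]
      simp
    · -- last iteration: i = length - 1, the suffix is empty and product = 1
      have hdropnil : Sik.drop (i + 1) = [] := List.drop_eq_nil_of_le (by omega)
      simp only [hlast, if_neg, not_false_eq_true]
      rw [pvLoopA]
      simp only [show ¬ (i + 1 < Sik.length) by omega, dif_neg, not_false_eq_true]
      rw [hdropnil]
      rw [show pvP ([] : List Int) = 1 from rfl,
        PySem.Int.floordiv_eq_ediv_of_pos (show (0:Int) < 1 by norm_num), Int.ediv_one]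
      simp [pvF]

-- B's fold: the running pair is (acc ++ LSB-digits so far, remaining quotient)
theorem pvLoopB_eq (t : List Int) (ht : ∀ x ∈ t, 0 < x) :
    ∀ (temp : Int) (acc : List Int),
      t.reverse.foldl
          (fun (st : List Int × Int) s =>
            (st.1 ++ [PySem.Int.mod st.2 s], PySem.Int.floordiv st.2 s))
          (acc, temp)
        = (acc ++ ((pvF temp t).drop 1).reverse, (pvF temp t).headI) := by
  induction t using List.reverseRecOn with
  | nil => intro temp acc; simp [pvF]
  | append_singleton t0 s ih =>
    intro temp acc
    have hs : 0 < s := ht s (by simp)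
    have ht0 : ∀ x ∈ t0, 0 < x := fun x hx => ht x (by simp [hx])
    rw [List.reverse_append, List.reverse_singleton, List.singleton_append, List.foldl_cons,
      ih ht0, PySem.Int.floordiv_eq_ediv_of_pos hs, PySem.Int.mod_eq_emod_of_pos hs,
      pvF_snoc temp s t0 hs ht0]
    obtain ⟨c, cs, hc⟩ := pvF_cons (temp / s) t0
    rw [hc]
    simp

-- ===== VERDICT (by name: the statement is the Claim_ definition above) =====
theorem virtual_idx_to_coords_py_spec : Claim_equal_virtual_idx_to_coords_py := by
  intro virtual_idx Sik _hdom hpre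
  unfold Spec_virtual_idx_to_coords_py virtual_idx_to_coords_py virtual_idx_to_coords_py_alt
  cases Sik with
  | nil => simp [pvLoopA, PySem.List.slice]
  | cons h t =>
    have htail : ∀ s ∈ t, 0 < s := by simpa using hpre
    have hslice : PySem.List.slice (h :: t) (some 1) none = t := by
      rw [PySem.List.slice_from_one]; rfl
    rw [hslice, if_neg (List.cons_ne_nil h t)]
    have hA := pvLoopA_eq (h :: t) (by simpa using htail) (t.length + 1) 0 [] virtual_idx
      (by simp) (by simp)
    rw [show (h :: t).drop (0 + 1) = t from rfl] at hA
    rw [show t.foldl (fun p s => p * s) 1 = pvP t from rfl, hA,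
      pvLoopB_eq t htail virtual_idx []]
    obtain ⟨c, cs, hc⟩ := pvF_cons virtual_idx t
    rw [hc]
    simp
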